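-- pv_equiv track=rewrite | github.com/onurdurhan/bulk_multimuon_search | MultiMuonMC.py | check_three_accepted
-- ===== SOURCE A (Python) =====
-- def check_three_accepted(three_clu):
--     accepted={0:True,1:True,2:True}
--     for k in three_clu:
--         nCl_hor = 0
--         nCl_ver = 0
--         for so in three_clu[k]:
--             if so%2==1:
--                 nCl_ver+=len(three_clu[k][so])
--             else:
--                 nCl_hor+=len(three_clu[k][so])
--         if nCl_ver< 1 or nCl_hor < 1 : accepted[k] = False
--     return all(accepted.values())
-- ===== SOURCE B (Python) =====
-- def check_three_accepted(three_clu):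
--     # per key: existence checks with short-circuit instead of summing lengths into counters
--     for k in three_clu:
--         subs = three_clu[k]
--         has_ver = any(so % 2 == 1 and len(subs[so]) > 0 for so in subs)
--         has_hor = any(so % 2 == 0 and len(subs[so]) > 0 for so in subs)
--         if not (has_ver and has_hor):
--             return False
--     return True
-- ===== Notes on version B (the rewrite author's own statement) =====
-- stated objective: simpler
-- what changed: B replaces A's inert {0,1,2:True} accepted-dict, the two length-sum counters and the final all() over dict values by a direct per-key pair of short-circuit any() existence checks, returning False at the first failing key.
import Mathlib
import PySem

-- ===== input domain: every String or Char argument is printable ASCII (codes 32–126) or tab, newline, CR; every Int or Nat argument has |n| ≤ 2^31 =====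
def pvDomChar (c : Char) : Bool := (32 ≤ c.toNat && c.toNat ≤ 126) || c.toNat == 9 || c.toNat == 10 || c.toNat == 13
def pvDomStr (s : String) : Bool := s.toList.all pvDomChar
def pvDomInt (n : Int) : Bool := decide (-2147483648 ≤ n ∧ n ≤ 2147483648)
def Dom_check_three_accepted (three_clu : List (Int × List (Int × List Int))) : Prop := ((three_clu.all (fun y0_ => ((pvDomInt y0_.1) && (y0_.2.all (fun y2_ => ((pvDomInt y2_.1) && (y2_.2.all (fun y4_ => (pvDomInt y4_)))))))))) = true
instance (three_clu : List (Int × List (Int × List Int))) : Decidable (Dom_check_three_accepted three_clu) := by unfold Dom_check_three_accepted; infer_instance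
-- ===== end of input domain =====

-- B drops A's inert {0,1,2:True} dict and length-sum counters for per-key short-circuit existence checks (objective: simpler).

-- ===== PORT A =====
-- inner loop: accumulates (nCl_hor, nCl_ver) as Python ints
def ctaInnerStep (p : Int × Int) (so : Int × List Int) : Int × Int :=
  if PySem.Int.mod so.1 2 == 1 then (p.1, p.2 + (so.2.length : Int))
  else (p.1 + (so.2.length : Int), p.2)

-- outer loop body: update the 'accepted' dict for one key
def ctaOuterStep (acc : PySem.Dict Int Bool) (kv : Int × List (Int × List Int)) : PySem.Dict Int Bool :=
  let sums := kv.2.foldl ctaInnerStep (0, 0)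
  if sums.2 < 1 ∨ sums.1 < 1 then acc.insert kv.1 false else acc

def check_three_accepted (three_clu : List (Int × List (Int × List Int))) : Bool :=
  let accepted0 : PySem.Dict Int Bool := PySem.Dict.ofList [(0, true), (1, true), (2, true)]
  let accepted := three_clu.foldl ctaOuterStep accepted0
  accepted.values.all (fun b => b)

-- ===== PORT B =====
def check_three_accepted_alt (three_clu : List (Int × List (Int × List Int))) : Bool :=
  three_clu.all (fun kv =>
    (kv.2.any (fun so => PySem.Int.mod so.1 2 == 1 && decide ((0 : Int) < (so.2.length : Int)))) &&
    (kv.2.any (fun so => PySem.Int.mod so.1 2 == 0 && decide ((0 : Int) < (so.2.length : Int)))))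

-- ===== PRECONDITION & SPEC =====
def Spec_check_three_accepted (three_clu : List (Int × List (Int × List Int))) (out : Bool) : Prop := out = check_three_accepted_alt three_clu
instance (three_clu : List (Int × List (Int × List Int))) (out : Bool) : Decidable (Spec_check_three_accepted three_clu out) := by unfold Spec_check_three_accepted; infer_instance

-- ===== CLAIM (what is proved, stated in full; the proofs are below) =====
def Claim_equal_check_three_accepted : Prop := ∀ (three_clu : List (Int × List (Int × List Int))), Dom_check_three_accepted three_clu → Spec_check_three_accepted three_clu (check_three_accepted three_clu)

-- ===== LEMMAS AND PROOFS =====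

-- the per-key acceptance test as B computes it
def ctaPass (kv : Int × List (Int × List Int)) : Bool :=
  (kv.2.any (fun so => PySem.Int.mod so.1 2 == 1 && decide ((0 : Int) < (so.2.length : Int)))) &&
  (kv.2.any (fun so => PySem.Int.mod so.1 2 == 0 && decide ((0 : Int) < (so.2.length : Int))))

-- sums of lengths over vertical / horizontal sub-objects
def ctaVSum (subs : List (Int × List Int)) : Int :=
  (subs.map (fun so => if PySem.Int.mod so.1 2 == 1 then (so.2.length : Int) else 0)).sum
def ctaHSum (subs : List (Int × List Int)) : Int :=
  (subs.map (fun so => if PySem.Int.mod so.1 2 == 1 then 0 else (so.2.length : Int))).sum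

theorem ctaVSum_cons (so : Int × List Int) (rest : List (Int × List Int)) :
    ctaVSum (so :: rest) = (if PySem.Int.mod so.1 2 == 1 then (so.2.length : Int) else 0) + ctaVSum rest := by
  simp [ctaVSum]

theorem ctaHSum_cons (so : Int × List Int) (rest : List (Int × List Int)) :
    ctaHSum (so :: rest) = (if PySem.Int.mod so.1 2 == 1 then 0 else (so.2.length : Int)) + ctaHSum rest := by
  simp [ctaHSum]

theorem ctaVSum_nonneg (subs : List (Int × List Int)) : 0 ≤ ctaVSum subs := by
  apply List.sum_nonneg
  intro x hx
  simp only [List.mem_map] at hx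
  obtain ⟨y, _, rfl⟩ := hx
  split <;> positivity

theorem ctaHSum_nonneg (subs : List (Int × List Int)) : 0 ≤ ctaHSum subs := by
  apply List.sum_nonneg
  intro x hx
  simp only [List.mem_map] at hx
  obtain ⟨y, _, rfl⟩ := hx
  split <;> positivity

theorem ctaInner_eq (subs : List (Int × List Int)) : ∀ (h v : Int),
    subs.foldl ctaInnerStep (h, v) = (h + ctaHSum subs, v + ctaVSum subs) := by
  induction subs with
  | nil => intro h v; simp [ctaHSum, ctaVSum]
  | cons so rest ih =>
    intro h v
    rw [List.foldl_cons, ctaHSum_cons, ctaVSum_cons]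
    by_cases hodd : PySem.Int.mod so.1 2 == 1
    · rw [show ctaInnerStep (h, v) so = (h, v + (so.2.length : Int)) from by
        unfold ctaInnerStep; rw [if_pos hodd], ih, if_pos hodd, if_pos hodd]
      simp only [Prod.mk.injEq]
      constructor <;> ring
    · rw [show ctaInnerStep (h, v) so = (h + (so.2.length : Int), v) from by
        unfold ctaInnerStep; rw [if_neg hodd], ih, if_neg hodd, if_neg hodd]
      simp only [Prod.mk.injEq]
      constructor <;> ring

theorem ctaVSum_pos_iff (subs : List (Int × List Int)) :
    (1 ≤ ctaVSum subs) ↔ (subs.any (fun so => PySem.Int.mod so.1 2 == 1 && decide ((0 : Int) < (so.2.length : Int)))) = true := by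
  induction subs with
  | nil => simp [ctaVSum]
  | cons so rest ih =>
    have hr := ctaVSum_nonneg rest
    rw [ctaVSum_cons, List.any_cons]
    by_cases hodd : PySem.Int.mod so.1 2 == 1
    · rw [if_pos hodd]
      simp only [hodd, Bool.true_and, Bool.or_eq_true, decide_eq_true_eq]
      rw [← ih]
      omega
    · rw [if_neg hodd]
      simp only [Bool.not_eq_true] at hodd
      simp only [hodd, Bool.false_and, Bool.false_or]
      rw [zero_add]
      exact ih

theorem ctaHSum_pos_iff (subs : List (Int × List Int)) :
    (1 ≤ ctaHSum subs) ↔ (subs.any (fun so => PySem.Int.mod so.1 2 == 0 && decide ((0 : Int) < (so.2.length : Int)))) = true := by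
  induction subs with
  | nil => simp [ctaHSum]
  | cons so rest ih =>
    have hr := ctaHSum_nonneg rest
    have hmod := PySem.Int.mod_two_eq so.1
    rw [ctaHSum_cons, List.any_cons]
    by_cases hodd : PySem.Int.mod so.1 2 == 1
    · have h0 : (PySem.Int.mod so.1 2 == 0) = false := by
        rw [beq_eq_false_iff_ne]
        simp only [beq_iff_eq] at hodd
        omega
      rw [if_pos hodd]
      simp only [h0, Bool.false_and, Bool.false_or]
      rw [zero_add]
      exact ih
    · have h0 : (PySem.Int.mod so.1 2 == 0) = true := by
        simp only [beq_iff_eq] at hodd ⊢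
        rcases hmod with h | h
        · exact h
        · exact absurd h hodd
      rw [if_neg hodd]
      simp only [h0, Bool.true_and, Bool.or_eq_true, decide_eq_true_eq]
      rw [← ih]
      omega

theorem ctaPass_iff (kv : Int × List (Int × List Int)) :
    ctaPass kv = true ↔ (1 ≤ ctaVSum kv.2 ∧ 1 ≤ ctaHSum kv.2) := by
  unfold ctaPass
  rw [Bool.and_eq_true, ← ctaVSum_pos_iff, ← ctaHSum_pos_iff]

-- the outer-step branch condition is exactly ¬ ctaPass
theorem ctaOuterStep_eq (acc : PySem.Dict Int Bool) (kv : Int × List (Int × List Int)) :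
    ctaOuterStep acc kv = if ctaPass kv then acc else acc.insert kv.1 false := by
  unfold ctaOuterStep
  rw [ctaInner_eq]
  by_cases hp : ctaPass kv
  · obtain ⟨h1, h2⟩ := (ctaPass_iff kv).mp hp
    rw [if_neg (by simp only [zero_add]; omega), if_pos hp]
  · have h3 : ¬ (1 ≤ ctaVSum kv.2 ∧ 1 ≤ ctaHSum kv.2) := fun hc => hp ((ctaPass_iff kv).mpr hc)
    rw [if_pos (by simp only [zero_add]; omega), if_neg hp]

theorem ctaInsert_false_mem (d : PySem.Dict Int Bool) (k : Int) :
    false ∈ (d.insert k false).values := by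
  simp only [PySem.Dict.values]
  exact List.mem_map.mpr ⟨(k, false), PySem.Dict.mem_items_insert_self d k false, rfl⟩

-- once a false value is in the dict, the rest of the loop keeps one there
theorem ctaFold_false_mem : ∀ (l : List (Int × List (Int × List Int))) (d : PySem.Dict Int Bool),
    false ∈ d.values → false ∈ (l.foldl ctaOuterStep d).values := by
  intro l
  induction l with
  | nil => intro d h; simpa using h
  | cons kv rest ih =>
    intro d h
    rw [List.foldl_cons, ctaOuterStep_eq]
    by_cases hp : ctaPass kv
    · rw [if_pos hp]; exact ih d h
    · rw [if_neg hp]; exact ih _ (ctaInsert_false_mem d kv.1)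

theorem ctaFold_all : ∀ (l : List (Int × List (Int × List Int))) (d : PySem.Dict Int Bool),
    (l.foldl ctaOuterStep d).values.all (fun b => b) = (d.values.all (fun b => b) && l.all ctaPass) := by
  intro l
  induction l with
  | nil => intro d; simp
  | cons kv rest ih =>
    intro d
    rw [List.foldl_cons, List.all_cons, ctaOuterStep_eq]
    by_cases hp : ctaPass kv
    · rw [if_pos hp, hp, Bool.true_and]; exact ih d
    · rw [if_neg hp]
      have hmem : false ∈ ((rest.foldl ctaOuterStep (d.insert kv.1 false)).values) :=
        ctaFold_false_mem rest _ (ctaInsert_false_mem d kv.1)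
      rw [List.all_eq_false.mpr ⟨false, hmem, by simp⟩]
      simp only [Bool.not_eq_true] at hp
      rw [hp, Bool.false_and, Bool.and_false]

-- ===== VERDICT (by name: the statement is the Claim_ definition above) =====
theorem check_three_accepted_spec : Claim_equal_check_three_accepted := by
  intro three_clu _
  unfold Spec_check_three_accepted check_three_accepted check_three_accepted_alt
  rw [ctaFold_all]
  have h0 : (PySem.Dict.ofList [((0:Int), true), (1, true), (2, true)]).values.all (fun b => b) = true := by decide
  rw [h0, Bool.true_and]
  rfl
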